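-- pv_equiv track=rewrite | github.com/Kikyo-16/coco-mulla-repo | coco_mulla/utilities/midi_utils.py | encode_simul_events
-- ===== SOURCE A (Python) =====
-- def encode_simul_events(events):
--     index = {}
--     outs = []
--     for event in events:
--         time = str(event["time"])
--         if time not in index:
--             index[time] = len(outs)
--             outs.append([])
--         ind = index[time]
--         outs[ind].append(event)
--     return outs, index
-- ===== SOURCE B (Python) =====
-- def encode_simul_events(events):
--     keys = list(dict.fromkeys(str(event["time"]) for event in events))
--     outs = [[e for e in events if str(e["time"]) == k] for k in keys]
--     index = {k: i for i, k in enumerate(keys)}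
--     return outs, index
-- ===== Notes on version B (the rewrite author's own statement) =====
-- stated objective: alternative
-- what changed: B replaces A's single-pass bucket-appending with a key->position map by staged passes: first the ordered list of distinct time keys (dict.fromkeys), then each group is built independently by filtering the whole event list per key; no buckets or positional bookkeeping are maintained during any loop. It trades A's O(n) single pass for O(n*k) nested scans.
import Mathlib
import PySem

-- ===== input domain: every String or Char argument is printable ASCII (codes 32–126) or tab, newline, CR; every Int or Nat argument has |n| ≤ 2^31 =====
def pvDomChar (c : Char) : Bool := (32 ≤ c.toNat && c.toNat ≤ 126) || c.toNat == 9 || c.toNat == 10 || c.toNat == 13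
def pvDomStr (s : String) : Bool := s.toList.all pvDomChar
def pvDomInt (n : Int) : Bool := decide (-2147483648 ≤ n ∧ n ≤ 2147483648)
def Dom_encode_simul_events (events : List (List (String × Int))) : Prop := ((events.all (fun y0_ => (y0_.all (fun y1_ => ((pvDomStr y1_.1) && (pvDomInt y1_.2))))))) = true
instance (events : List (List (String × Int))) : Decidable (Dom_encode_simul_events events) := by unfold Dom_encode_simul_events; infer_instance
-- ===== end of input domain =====

-- B groups by staged passes: ordered distinct keys first (dict.fromkeys), then each group built by
-- filtering the whole event list per key — instead of A's single pass appending into buckets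
-- tracked by a key->position map (objective: alternative; not faster, O(n*k) vs O(n)).

-- ===== PORT A =====
-- str(event["time"]); event["time"] raises KeyError if "time" is missing — excluded by Pre_
-- (the port totalizes the lookup with default 0 there; both ports use the same helper).
def pvTimeKey (event : List (String × Int)) : String :=
  PySem.Int.toStr ((PySem.Dict.mk event).getD "time" 0)

-- literal transliteration of A's loop: state = (index, outs)
def encode_simul_events (events : List (List (String × Int))) : (List (List (List (String × Int)))) × (List (String × Int)) :=
  let st := events.foldl
    (fun (st : PySem.Dict String Int × List (List (List (String × Int)))) event =>
      let time := pvTimeKey event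
      let st :=
        if st.1.contains time then st
        else (st.1.insert time (st.2.length : Int), st.2 ++ [[]])
      let ind := st.1.getD time 0
      (st.1, st.2.set ind.toNat (st.2.getD ind.toNat [] ++ [event])))
    (PySem.Dict.empty, [])
  (st.2, st.1.items)

-- ===== PORT B =====
-- keys = list(dict.fromkeys(str(e["time"]) for e in events)) = PySem.List.dedup of the key list;
-- outs = per-key filter of the whole list; index = {k: i for i, k in enumerate(keys)}
def encode_simul_events_alt (events : List (List (String × Int))) : (List (List (List (String × Int)))) × (List (String × Int)) :=
  let keys := PySem.List.dedup (events.map pvTimeKey)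
  let outs := keys.map (fun k => events.filter (fun e => pvTimeKey e == k))
  (outs, (PySem.List.enumerate keys).map (fun p => (p.2, p.1)))

-- ===== PRECONDITION & SPEC =====
-- Pre_ excludes exactly the inputs where A raises KeyError: some event without a "time" key.
def Pre_encode_simul_events (events : List (List (String × Int))) : Prop :=
  ∀ e ∈ events, "time" ∈ e.map (·.1)
instance (events : List (List (String × Int))) : Decidable (Pre_encode_simul_events events) := by unfold Pre_encode_simul_events; infer_instance
def pvWitness_encode_simul_events : (List (List (String × Int))) :=
  [[("time", 3), ("pitch", 60)], [("time", 1)], [("time", 3)]]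

def Spec_encode_simul_events (events : List (List (String × Int))) (out : (List (List (List (String × Int)))) × (List (String × Int))) : Prop := out = encode_simul_events_alt events
instance (events : List (List (String × Int))) (out : (List (List (List (String × Int)))) × (List (String × Int))) : Decidable (Spec_encode_simul_events events out) := by unfold Spec_encode_simul_events; infer_instance

-- ===== CLAIM (what is proved, stated in full; the proofs are below) =====
def Claim_equal_encode_simul_events : Prop := ∀ (events : List (List (String × Int))), Dom_encode_simul_events events → Pre_encode_simul_events events → Spec_encode_simul_events events (encode_simul_events events)

-- ===== LEMMAS AND PROOFS =====

-- A's loop invariant, stated against the processed prefix p: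
-- with K the ordered distinct keys of p, A's index lists (k, position-in-K) and
-- A's outs is exactly B's per-key filter of p over K.
def pvInv (p : List (List (String × Int)))
    (idx : PySem.Dict String Int) (outs : List (List (List (String × Int)))) : Prop :=
  idx.items = (PySem.List.enumerate (PySem.Set.ofList (p.map pvTimeKey))).map (fun q => (q.2, q.1)) ∧
  outs = (PySem.Set.ofList (p.map pvTimeKey)).map
    (fun k => p.filter (fun e => pvTimeKey e == k))

theorem pv_set_map_idxOf {β : Type} (K : List String) (f : String → β) (t : String) (v : β)
    (hnd : K.Nodup) (ht : t ∈ K) :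
    (K.map f).set (List.idxOf t K) v = K.map (fun k => if k = t then v else f k) := by
  induction K with
  | nil => cases ht
  | cons a K ih =>
    by_cases hat : a = t
    · subst hat
      have hnot : a ∉ K := (List.nodup_cons.mp hnd).1
      simp only [List.idxOf_cons_self, List.map_cons, List.set_cons_zero, List.cons.injEq]
      refine ⟨by simp, ?_⟩
      apply List.map_congr_left
      intro k hk
      have : k ≠ a := fun h => hnot (h ▸ hk)
      simp [this]
    · have hbeq : (a == t) = false := by simp [hat]
      have ht' : t ∈ K := by
        rcases List.mem_cons.mp ht with h | h
        · exact absurd h.symm hat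
        · exact h
      rw [List.idxOf_cons, hbeq]
      simp only [cond_false, List.map_cons, List.set_cons_succ]
      rw [ih (List.nodup_cons.mp hnd).2 ht']
      simp [hat]

theorem pv_getD_mk_enum (K : List String) (s : Int) (t : String) (ht : t ∈ K) :
    (PySem.Dict.mk ((PySem.List.enumerate K s).map (fun p => (p.2, p.1)))).getD t 0
      = s + (List.idxOf t K : Int) := by
  induction K generalizing s with
  | nil => cases ht
  | cons a K ih =>
    rw [PySem.List.enumerate_cons]
    by_cases hat : a = t
    · subst hat
      simp [PySem.Dict.getD_eq_get?_getD, PySem.Dict.get?_mk_cons]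
    · have ht' : t ∈ K := by
        rcases List.mem_cons.mp ht with h | h
        · exact absurd h.symm hat
        · exact h
      have h1 : (a == t) = false := by simp [hat]
      simp only [List.map_cons]
      rw [PySem.Dict.getD_eq_get?_getD, PySem.Dict.get?_mk_cons]
      rw [h1]
      simp only [Bool.false_eq_true, if_false]
      rw [← PySem.Dict.getD_eq_get?_getD, ih (s + 1) ht']
      simp only [List.idxOf_cons, h1, cond_false]
      push_cast
      ring

-- one step of A's loop preserves the invariant (prefix grows by one event)
theorem pv_step (p : List (List (String × Int)))
    (idx : PySem.Dict String Int) (outs : List (List (List (String × Int))))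
    (event : List (String × Int)) (h : pvInv p idx outs) :
    pvInv (p ++ [event])
      (let time := pvTimeKey event
       let st :=
         if idx.contains time then (idx, outs)
         else (idx.insert time (outs.length : Int), outs ++ [[]])
       st.1)
      (let time := pvTimeKey event
       let st :=
         if idx.contains time then (idx, outs)
         else (idx.insert time (outs.length : Int), outs ++ [[]])
       let ind := st.1.getD time 0
       st.2.set ind.toNat (st.2.getD ind.toNat [] ++ [event])) := by
  obtain ⟨hidx, houts⟩ := h
  set t := pvTimeKey event with ht
  set K := PySem.Set.ofList (p.map pvTimeKey) with hK
  have hnd : K.Nodup := PySem.Set.nodup_ofList _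
  have hK' : PySem.Set.ofList ((p ++ [event]).map pvTimeKey) = PySem.Set.add K t := by
    rw [List.map_append]
    simpa using PySem.Set.ofList_append_singleton (p.map pvTimeKey) t
  have hkeysidx : idx.keys = K := by
    show idx.items.map (·.1) = K
    rw [hidx, List.map_map]
    exact PySem.List.map_snd_enumerate K 0
  have hcont : idx.contains t = K.contains t := by
    by_cases hm : t ∈ K
    · rw [(PySem.Dict.contains_iff_mem_keys idx t).mpr (hkeysidx ▸ hm)]
      simp [hm]
    · have h1 : ¬ idx.contains t = true := fun hc =>
        hm (hkeysidx ▸ (PySem.Dict.contains_iff_mem_keys idx t).mp hc)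
      have h2 : ¬ K.contains t = true := fun hc => hm ((PySem.Set.contains_iff _ _).mp hc)
      simp only [Bool.not_eq_true] at h1 h2
      rw [h1, h2]
  have hfilt : ∀ k, (p ++ [event]).filter (fun e => pvTimeKey e == k)
      = p.filter (fun e => pvTimeKey e == k) ++ (if k = t then [event] else []) := by
    intro k
    rw [List.filter_append]
    by_cases hkt : k = t
    · subst hkt; simp [← ht]
    · have : (t == k) = false := by simp [Ne.symm hkt]
      simp [← ht, this, hkt]
  by_cases hm : t ∈ K
  · -- existing key
    have hc : idx.contains t = true := by
      rw [hcont]; exact (PySem.Set.contains_iff _ _).mpr hm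
    have hadd : PySem.Set.add K t = K := PySem.Set.add_of_mem hm
    have hidxeq : idx = PySem.Dict.mk ((PySem.List.enumerate K).map (fun q => (q.2, q.1))) := by
      apply PySem.Dict.ext; exact hidx
    have hgetD : idx.getD t 0 = (List.idxOf t K : Int) := by
      rw [hidxeq, pv_getD_mk_enum K 0 t hm]; ring
    simp only [hc, if_true]
    constructor
    · rw [hK', hadd]; exact hidx
    · rw [hK', hadd]
      have hlt : List.idxOf t K < K.length := List.idxOf_lt_length_of_mem hm
      have hget : K[List.idxOf t K]'hlt = t := List.getElem_idxOf hlt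
      have hOutsGet : outs.getD (idx.getD t 0).toNat []
          = p.filter (fun e => pvTimeKey e == t) := by
        rw [hgetD, houts]
        simp only [Int.toNat_natCast]
        rw [List.getD_eq_getElem?_getD, List.getElem?_map]
        simp [List.getElem?_eq_getElem hlt, hget]
      rw [hOutsGet, houts, hgetD]
      simp only [Int.toNat_natCast]
      rw [pv_set_map_idxOf K _ t _ hnd hm]
      apply List.map_congr_left
      intro k hk
      rw [hfilt k]
      by_cases hkt : k = t
      · subst hkt; simp
      · simp [hkt]
  · -- new key
    have hc : idx.contains t = false := by
      rw [hcont]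
      by_cases h : K.contains t = true
      · exact absurd ((PySem.Set.contains_iff _ _).mp h) hm
      · simpa using h
    have hadd : PySem.Set.add K t = K ++ [t] := PySem.Set.add_of_not_mem hm
    have hlen : outs.length = K.length := by rw [houts, List.length_map]
    have hfiltT : p.filter (fun e => pvTimeKey e == t) = [] := by
      rw [List.filter_eq_nil_iff]
      intro e he hbe
      exact hm (hK ▸ ((PySem.Set.mem_ofList _ _).mpr
        (List.mem_map.mpr ⟨e, he, eq_of_beq hbe⟩)))
    simp only [hc, Bool.false_eq_true, if_false]
    constructor
    · rw [hK', hadd, PySem.Dict.items_insert_of_not_contains _ _ hc, hidx,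
        PySem.List.enumerate_append]
      simp [hlen]
    · rw [hK', hadd, PySem.Dict.getD_insert_self]
      have hset : (outs ++ [[]]).set outs.length ((outs ++ [[]]).getD outs.length [] ++ [event])
          = outs ++ [[event]] := by
        rw [List.getD_eq_getElem?_getD, List.getElem?_append_right (le_refl _)]
        simp
      simp only [Int.toNat_natCast, hset]
      rw [List.map_append, houts]
      congr 1
      · apply List.map_congr_left
        intro k hk
        have hkt : k ≠ t := fun h => hm (h ▸ hk)
        rw [hfilt k, if_neg hkt, List.append_nil]
      · simp [hfilt, hfiltT]

theorem pv_fold (rest p : List (List (String × Int)))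
    (idx : PySem.Dict String Int) (outs : List (List (List (String × Int))))
    (h : pvInv p idx outs) :
    pvInv (p ++ rest)
      (rest.foldl
        (fun (st : PySem.Dict String Int × List (List (List (String × Int)))) event =>
          let time := pvTimeKey event
          let st :=
            if st.1.contains time then st
            else (st.1.insert time (st.2.length : Int), st.2 ++ [[]])
          let ind := st.1.getD time 0
          (st.1, st.2.set ind.toNat (st.2.getD ind.toNat [] ++ [event]))) (idx, outs)).1
      (rest.foldl
        (fun (st : PySem.Dict String Int × List (List (List (String × Int)))) event =>
          let time := pvTimeKey event
          let st :=
            if st.1.contains time then st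
            else (st.1.insert time (st.2.length : Int), st.2 ++ [[]])
          let ind := st.1.getD time 0
          (st.1, st.2.set ind.toNat (st.2.getD ind.toNat [] ++ [event]))) (idx, outs)).2 := by
  induction rest generalizing p idx outs with
  | nil => simpa using h
  | cons e es ih =>
    simp only [List.foldl_cons]
    have := ih (p ++ [e]) _ _ (pv_step p idx outs e h)
    simpa [List.append_assoc] using this

-- ===== VERDICT (by name: the statement is the Claim_ definition above) =====
theorem encode_simul_events_spec : Claim_equal_encode_simul_events := by
  intro events _ _
  show _ = _
  unfold encode_simul_events encode_simul_events_alt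
  obtain ⟨hidx, houts⟩ := pv_fold events [] PySem.Dict.empty [] ⟨rfl, rfl⟩
  simp only [List.nil_append] at hidx houts
  dsimp only
  refine Prod.ext_iff.mpr ⟨?_, ?_⟩
  · rw [houts, PySem.List.dedup_eq_ofList]
  · rw [hidx, PySem.List.dedup_eq_ofList]
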